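-- pv_equiv track=rewrite | github.com/jadenmaciel/ai-validation-mcp-server | mcp_server.py | determine_expert_role
-- ===== SOURCE A (Python) =====
-- def determine_expert_role(prompt):
--     """Determine the most appropriate expert role based on prompt content."""
--     prompt_lower = prompt.lower()
--
--     if any(word in prompt_lower for word in ['code', 'programming', 'software', 'debug']):
--         return "a senior software engineer with 10+ years of experience in multiple programming languages and best practices"
--     elif any(word in prompt_lower for word in ['write', 'content', 'marketing', 'copy']):
--         return "an expert copywriter and content strategist with deep understanding of persuasive writing"
--     elif any(word in prompt_lower for word in ['analyze', 'data', 'research']):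
--         return "a data analyst and research expert skilled in systematic analysis and insight generation"
--     elif any(word in prompt_lower for word in ['design', 'ui', 'ux', 'interface']):
--         return "a senior UX/UI designer with expertise in user-centered design and interface optimization"
--     elif any(word in prompt_lower for word in ['business', 'strategy', 'plan']):
--         return "a business strategy consultant with extensive experience in strategic planning and execution"
--
--     return None
-- ===== SOURCE B (Python) =====
-- ROLES = [
--     "a senior software engineer with 10+ years of experience in multiple programming languages and best practices",
--     "an expert copywriter and content strategist with deep understanding of persuasive writing",
--     "a data analyst and research expert skilled in systematic analysis and insight generation",
--     "a senior UX/UI designer with expertise in user-centered design and interface optimization",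
--     "a business strategy consultant with extensive experience in strategic planning and execution",
-- ]
--
-- FLAT_KEYWORDS = [
--     ('code', 0), ('programming', 0), ('software', 0), ('debug', 0),
--     ('write', 1), ('content', 1), ('marketing', 1), ('copy', 1),
--     ('analyze', 2), ('data', 2), ('research', 2),
--     ('design', 3), ('ui', 3), ('ux', 3), ('interface', 3),
--     ('business', 4), ('strategy', 4), ('plan', 4),
-- ]
--
--
-- def determine_expert_role(prompt):
--     """Determine the most appropriate expert role based on prompt content."""
--     prompt_lower = prompt.lower()
--     best = None
--     for word, group in FLAT_KEYWORDS:
--         if word in prompt_lower: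
--             best = group if best is None else min(best, group)
--     return None if best is None else ROLES[best]
-- ===== Notes on version B (the rewrite author's own statement) =====
-- stated objective: alternative
-- what changed: Replaces the ordered if/elif chain of per-group any-checks with one exhaustive flat pass over all (keyword, group-index) pairs that accumulates the minimum matched group index, then indexes into a role list; correct because the first matching group in A's order is exactly the minimum group index with any matching keyword.
import Mathlib
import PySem

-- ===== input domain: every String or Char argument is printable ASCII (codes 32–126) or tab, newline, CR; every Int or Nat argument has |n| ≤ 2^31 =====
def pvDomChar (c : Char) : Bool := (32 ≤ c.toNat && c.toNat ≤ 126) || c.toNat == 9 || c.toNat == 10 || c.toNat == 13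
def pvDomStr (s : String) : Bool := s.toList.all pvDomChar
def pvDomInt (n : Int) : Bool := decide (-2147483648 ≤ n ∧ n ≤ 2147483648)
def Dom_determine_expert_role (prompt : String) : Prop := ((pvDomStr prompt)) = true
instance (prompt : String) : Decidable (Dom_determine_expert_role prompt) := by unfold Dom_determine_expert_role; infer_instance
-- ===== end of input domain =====

-- B replaces the ordered if/elif chain by one exhaustive flat pass over (keyword, group) pairs
-- accumulating the minimum matched group index (alternative decomposition, same cost).

-- ===== PORT A =====
def determine_expert_role (prompt : String) : Option String :=
  let prompt_lower := PySem.Str.lower prompt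
  if ["code", "programming", "software", "debug"].any (fun word => PySem.Str.isIn word prompt_lower) then
    some "a senior software engineer with 10+ years of experience in multiple programming languages and best practices"
  else if ["write", "content", "marketing", "copy"].any (fun word => PySem.Str.isIn word prompt_lower) then
    some "an expert copywriter and content strategist with deep understanding of persuasive writing"
  else if ["analyze", "data", "research"].any (fun word => PySem.Str.isIn word prompt_lower) then
    some "a data analyst and research expert skilled in systematic analysis and insight generation"
  else if ["design", "ui", "ux", "interface"].any (fun word => PySem.Str.isIn word prompt_lower) then
    some "a senior UX/UI designer with expertise in user-centered design and interface optimization"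
  else if ["business", "strategy", "plan"].any (fun word => PySem.Str.isIn word prompt_lower) then
    some "a business strategy consultant with extensive experience in strategic planning and execution"
  else
    none

-- ===== PORT B =====
def pvRoles : List String :=
  [ "a senior software engineer with 10+ years of experience in multiple programming languages and best practices",
    "an expert copywriter and content strategist with deep understanding of persuasive writing",
    "a data analyst and research expert skilled in systematic analysis and insight generation",
    "a senior UX/UI designer with expertise in user-centered design and interface optimization",
    "a business strategy consultant with extensive experience in strategic planning and execution" ]

def pvFlatKeywords : List (String × Nat) :=
  [ ("code", 0), ("programming", 0), ("software", 0), ("debug", 0),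
    ("write", 1), ("content", 1), ("marketing", 1), ("copy", 1),
    ("analyze", 2), ("data", 2), ("research", 2),
    ("design", 3), ("ui", 3), ("ux", 3), ("interface", 3),
    ("business", 4), ("strategy", 4), ("plan", 4) ]

-- update step of B's single pass: take the min matched group index so far
def pvUpd (prompt_lower : String) (best : Option Nat) (wg : String × Nat) : Option Nat :=
  if PySem.Str.isIn wg.1 prompt_lower then
    (match best with
     | none => some wg.2
     | some a => some (Nat.min a wg.2))
  else best

def determine_expert_role_alt (prompt : String) : Option String :=
  let prompt_lower := PySem.Str.lower prompt
  let best : Option Nat := pvFlatKeywords.foldl (pvUpd prompt_lower) none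
  match best with
  | none => none
  | some g => PySem.List.pyGet? pvRoles (g : Int)   -- ROLES[best]; g is always in range here

-- ===== PRECONDITION & SPEC =====
def Spec_determine_expert_role (prompt : String) (out : Option String) : Prop := out = determine_expert_role_alt prompt
instance (prompt : String) (out : Option String) : Decidable (Spec_determine_expert_role prompt out) := by unfold Spec_determine_expert_role; infer_instance

-- ===== CLAIM (what is proved, stated in full; the proofs are below) =====
def Claim_equal_determine_expert_role : Prop := ∀ (prompt : String), Dom_determine_expert_role prompt → Spec_determine_expert_role prompt (determine_expert_role prompt)

-- ===== LEMMAS AND PROOFS =====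

-- one group's segment of the flat fold: updates the accumulator iff some keyword of the group matches
theorem pvSegFold (p : String) (ws : List String) (i : Nat) (acc : Option Nat) :
    List.foldl (pvUpd p) acc (ws.map (fun w => (w, i)))
    = if ws.any (fun w => PySem.Str.isIn w p) then
        some (match acc with | none => i | some a => Nat.min a i)
      else acc := by
  induction ws generalizing acc with
  | nil => simp
  | cons w rest ih =>
    simp only [List.map, List.foldl, List.any_cons]
    by_cases hw : PySem.Str.isIn w p = true
    · rw [show pvUpd p acc (w, i)
            = some (match acc with | none => i | some a => Nat.min a i) from by
          cases acc <;> (unfold pvUpd; rw [if_pos hw])]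
      rw [ih]
      simp only [hw, Bool.true_or, if_true]
      cases acc <;> cases hrest : rest.any (fun w => PySem.Str.isIn w p) <;>
        simp [Nat.min_assoc, Nat.min_self]
    · rw [show pvUpd p acc (w, i) = acc from by unfold pvUpd; rw [if_neg hw]]
      rw [ih]
      have hw' : PySem.Str.isIn w p = false := by simpa using hw
      simp only [hw', Bool.false_or]

theorem pvFlat_eq :
    pvFlatKeywords =
      (["code", "programming", "software", "debug"].map (fun w => (w, 0)))
      ++ (["write", "content", "marketing", "copy"].map (fun w => (w, 1)))
      ++ (["analyze", "data", "research"].map (fun w => (w, 2)))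
      ++ (["design", "ui", "ux", "interface"].map (fun w => (w, 3)))
      ++ (["business", "strategy", "plan"].map (fun w => (w, 4))) := rfl

-- ===== VERDICT (by name: the statement is the Claim_ definition above) =====
theorem determine_expert_role_spec : Claim_equal_determine_expert_role := by
  intro prompt _
  unfold Spec_determine_expert_role determine_expert_role determine_expert_role_alt
  rw [pvFlat_eq]
  simp only [List.foldl_append, pvSegFold]
  cases h1 : ["code", "programming", "software", "debug"].any
      (fun word => PySem.Str.isIn word (PySem.Str.lower prompt)) <;>
  cases h2 : ["write", "content", "marketing", "copy"].any
      (fun word => PySem.Str.isIn word (PySem.Str.lower prompt)) <;>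
  cases h3 : ["analyze", "data", "research"].any
      (fun word => PySem.Str.isIn word (PySem.Str.lower prompt)) <;>
  cases h4 : ["design", "ui", "ux", "interface"].any
      (fun word => PySem.Str.isIn word (PySem.Str.lower prompt)) <;>
  cases h5 : ["business", "strategy", "plan"].any
      (fun word => PySem.Str.isIn word (PySem.Str.lower prompt)) <;>
  simp [h1, h2, h3, h4, h5] <;> rfl
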